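-- pv_equiv track=rewrite | github.com/Niranjan11111/Codathon-Answers | tree.py | find_number_of_children
-- ===== SOURCE A (Python) =====
-- def find_number_of_children(parent_array, x):
--     # Create a dictionary to store children for each node
--     tree = {}
--
--     n = len(parent_array)
--     for i in range(n):
--         parent = parent_array[i]
--         if parent not in tree:
--             tree[parent] = []
--         tree[parent].append(i)
--
--     # If x is not in the tree or has no children, return 0
--     if x not in tree:
--         return 0
--
--     return len(tree[x])
-- ===== SOURCE B (Python) =====
-- def find_number_of_children(parent_array, x):
--     # Single pass: count occurrences of x as a parent; no tree dict is built.
--     count = 0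
--     for parent in parent_array:
--         if parent == x:
--             count += 1
--     return count
-- ===== Notes on version B (the rewrite author's own statement) =====
-- stated objective: simpler
-- what changed: Replaces building a full children dictionary (grouping every index under its parent, then looking up x) with a single scan that keeps one integer counter of how often x occurs in parent_array.
import Mathlib
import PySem

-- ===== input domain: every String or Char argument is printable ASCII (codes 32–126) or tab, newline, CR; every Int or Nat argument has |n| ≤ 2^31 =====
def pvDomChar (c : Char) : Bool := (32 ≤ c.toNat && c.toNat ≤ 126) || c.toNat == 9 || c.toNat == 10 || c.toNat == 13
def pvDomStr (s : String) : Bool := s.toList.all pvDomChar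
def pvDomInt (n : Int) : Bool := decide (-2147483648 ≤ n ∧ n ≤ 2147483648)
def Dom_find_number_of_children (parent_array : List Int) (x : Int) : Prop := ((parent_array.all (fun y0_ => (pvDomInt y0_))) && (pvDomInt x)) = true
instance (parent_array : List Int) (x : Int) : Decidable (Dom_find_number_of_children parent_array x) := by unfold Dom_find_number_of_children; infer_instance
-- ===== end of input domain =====

-- B drops A's children dictionary and keeps a single counter (simpler; return value only).

-- ===== PORT A =====
-- one loop iteration of A: look up parent_array[i], create tree[parent] = [] if absent, append i
def fnocStep (parent_array : List Int) (tree : PySem.Dict Int (List Int)) (i : Int) :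
    PySem.Dict Int (List Int) :=
  let parent := PySem.List.pyGetD parent_array i 0
  let tree := if tree.contains parent then tree else tree.insert parent []
  tree.modify parent [] (fun l => l ++ [i])

def find_number_of_children (parent_array : List Int) (x : Int) : Int :=
  let n : Int := parent_array.length
  let tree := (PySem.List.pyRange 0 n 1).foldl (fnocStep parent_array) PySem.Dict.empty
  if tree.contains x then ((tree.getD x []).length : Int) else 0

-- ===== PORT B =====
def find_number_of_children_alt (parent_array : List Int) (x : Int) : Int :=
  parent_array.foldl (fun count parent => if parent == x then count + 1 else count) 0

-- ===== PRECONDITION & SPEC =====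
def Spec_find_number_of_children (parent_array : List Int) (x : Int) (out : Int) : Prop := out = find_number_of_children_alt parent_array x
instance (parent_array : List Int) (x : Int) (out : Int) : Decidable (Spec_find_number_of_children parent_array x out) := by unfold Spec_find_number_of_children; infer_instance

-- ===== CLAIM (what is proved, stated in full; the proofs are below) =====
def Claim_equal_find_number_of_children : Prop := ∀ (parent_array : List Int) (x : Int), Dom_find_number_of_children parent_array x → Spec_find_number_of_children parent_array x (find_number_of_children parent_array x)

-- ===== LEMMAS AND PROOFS =====

-- one step changes the length of tree[x] by 1 exactly when parent_array[i] == x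
lemma fnocStep_len (pa : List Int) (tree : PySem.Dict Int (List Int)) (i x : Int) :
    ((fnocStep pa tree i).getD x []).length
      = (tree.getD x []).length + (if PySem.List.pyGetD pa i 0 = x then 1 else 0) := by
  unfold fnocStep
  dsimp only
  by_cases hx : x = PySem.List.pyGetD pa i 0
  · subst hx
    by_cases hc : tree.contains (PySem.List.pyGetD pa i 0)
    · rw [if_pos hc, PySem.Dict.getD_modify_self]; simp
    · rw [if_neg hc, PySem.Dict.getD_modify_self, PySem.Dict.getD_insert_self,
          PySem.Dict.getD_of_not_contains tree [] (by simpa using hc)]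
      simp
  · have hne : PySem.List.pyGetD pa i 0 ≠ x := fun h => hx h.symm
    by_cases hc : tree.contains (PySem.List.pyGetD pa i 0)
    · rw [if_pos hc, PySem.Dict.getD_modify_of_ne tree [] _ hx, if_neg hne]
      simp
    · rw [if_neg hc, PySem.Dict.getD_modify_of_ne _ [] _ hx,
          PySem.Dict.getD_insert_of_ne tree [] [] hx, if_neg hne]
      simp

-- the whole fold: length of tree[x] = initial length + number of indices whose parent is x
lemma fnoc_fold_len (pa : List Int) (x : Int) (l : List Int) :
    ∀ d : PySem.Dict Int (List Int),
      ((l.foldl (fnocStep pa) d).getD x []).length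
        = (d.getD x []).length + l.countP (fun i => PySem.List.pyGetD pa i 0 == x) := by
  induction l with
  | nil => intro d; simp
  | cons i t ih =>
      intro d
      simp only [List.foldl_cons, ih, fnocStep_len, List.countP_cons]
      by_cases h : PySem.List.pyGetD pa i 0 = x <;> simp [h] <;> omega

-- after A's whole loop, the length of tree[x] (empty list if x is absent) is the count of x in pa
lemma fnoc_tree_getD (pa : List Int) (x : Int) :
    ((((PySem.List.pyRange 0 (pa.length : Int) 1).foldl (fnocStep pa)
        PySem.Dict.empty).getD x []).length : Int) = (pa.count x : Int) := by
  have h := fnoc_fold_len pa x (PySem.List.pyRange 0 (pa.length : Int) 1) PySem.Dict.empty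
  have hmap : (PySem.List.pyRange 0 (pa.length : Int) 1).map
      (fun i => PySem.List.pyGetD pa i 0) = pa := PySem.List.map_pyGetD_pyRange_zero pa 0
  have hcount : (PySem.List.pyRange 0 (pa.length : Int) 1).countP
      (fun i => PySem.List.pyGetD pa i 0 == x) = pa.count x := by
    have hm := List.countP_map (p := fun v => v == x)
      (f := fun i => PySem.List.pyGetD pa i 0) (l := PySem.List.pyRange 0 (pa.length : Int) 1)
    rw [hmap] at hm
    simpa [List.count, Function.comp] using hm.symm
  rw [h, hcount]
  simp

-- ===== VERDICT (by name: the statement is the Claim_ definition above) =====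
theorem find_number_of_children_spec : Claim_equal_find_number_of_children := by
  intro pa x _
  unfold Spec_find_number_of_children find_number_of_children find_number_of_children_alt
  rw [PySem.List.foldl_beq_add_one]
  have h := fnoc_tree_getD pa x
  by_cases hc : ((PySem.List.pyRange 0 (pa.length : Int) 1).foldl (fnocStep pa)
      PySem.Dict.empty).contains x
  · simp only [hc, if_pos, h]
    simp
  · have h0 : (((PySem.List.pyRange 0 (pa.length : Int) 1).foldl (fnocStep pa)
        PySem.Dict.empty).getD x []) = [] :=
      PySem.Dict.getD_of_not_contains _ _ (by simpa using hc)
    rw [h0] at h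
    simp only [hc]
    simp [← h]
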